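-- pv_equiv track=rewrite | github.com/mohammadfaiizan/ProjectI | DSA/Dynamic_Programming/003_dp_knapsack_01.py | knapsack_with_conflicts
-- ===== SOURCE A (Python) =====
-- from typing import List, Dict, Tuple, Optional, Set
--
-- def knapsack_with_conflicts(weights: List[int], values: List[int],
--                            capacity: int, conflicts: List[Tuple[int, int]]) -> int:
--     """
--     0/1 Knapsack where some items cannot be selected together
--
--     This requires more complex DP or constraint programming
--     For simplicity, implementing with bitmask DP for small n
--     """
--     n = len(weights)
--     if n > 20:  # Too large for bitmask DP
--         return -1
--
--     # Create conflict set for each item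
--     conflict_sets = [set() for _ in range(n)]
--     for i, j in conflicts:
--         conflict_sets[i].add(j)
--         conflict_sets[j].add(i)
--
--     max_value = 0
--
--     # Try all possible combinations (2^n)
--     for mask in range(1 << n):
--         total_weight = 0
--         total_value = 0
--         valid = True
--
--         selected_items = []
--         for i in range(n):
--             if mask & (1 << i):
--                 selected_items.append(i)
--                 total_weight += weights[i]
--                 total_value += values[i]
--
--         # Check weight constraint
--         if total_weight > capacity:
--             continue
--
--         # Check conflict constraints
--         for i in selected_items:
--             for j in selected_items:
--                 if i != j and j in conflict_sets[i]:
--                     valid = False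
--                     break
--             if not valid:
--                 break
--
--         if valid:
--             max_value = max(max_value, total_value)
--
--     return max_value
-- ===== SOURCE B (Python) =====
-- def knapsack_with_conflicts(weights, values, capacity, conflicts):
--     """Branch-and-enumerate over items with precomputed conflict bitmasks,
--     carrying running weight/value instead of recomputing them per subset."""
--     n = len(weights)
--     if n > 20:  # same guard as the exponential enumeration needs
--         return -1
--
--     conf = [0] * n
--     for i, j in conflicts:
--         conf[i] |= 1 << j
--         conf[j] |= 1 << i
--
--     def go(i, w, v, banned):
--         if i >= n:
--             return v if w <= capacity else 0
--         best = go(i + 1, w, v, banned)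
--         if (banned >> i) & 1 == 0:
--             cand = go(i + 1, w + weights[i], v + values[i], banned | conf[i])
--             best = max(best, cand)
--         return best
--
--     return go(0, 0, 0, 0)
-- ===== Notes on version B (the rewrite author's own statement) =====
-- stated objective: alternative
-- what changed: Replaces A's loop over all 2^n bitmasks with per-mask item collection and pairwise conflict-set checking by a branch recursion over items that carries the running weight, value and a 'banned' conflict bitmask built once from the conflict list.
-- outside the precondition, e.g. on knapsack_with_conflicts([1, 2, 3], [5, 6, 7], 10, [(-1, 0)]): A returns 13, B raises ValueError
import Mathlib
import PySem

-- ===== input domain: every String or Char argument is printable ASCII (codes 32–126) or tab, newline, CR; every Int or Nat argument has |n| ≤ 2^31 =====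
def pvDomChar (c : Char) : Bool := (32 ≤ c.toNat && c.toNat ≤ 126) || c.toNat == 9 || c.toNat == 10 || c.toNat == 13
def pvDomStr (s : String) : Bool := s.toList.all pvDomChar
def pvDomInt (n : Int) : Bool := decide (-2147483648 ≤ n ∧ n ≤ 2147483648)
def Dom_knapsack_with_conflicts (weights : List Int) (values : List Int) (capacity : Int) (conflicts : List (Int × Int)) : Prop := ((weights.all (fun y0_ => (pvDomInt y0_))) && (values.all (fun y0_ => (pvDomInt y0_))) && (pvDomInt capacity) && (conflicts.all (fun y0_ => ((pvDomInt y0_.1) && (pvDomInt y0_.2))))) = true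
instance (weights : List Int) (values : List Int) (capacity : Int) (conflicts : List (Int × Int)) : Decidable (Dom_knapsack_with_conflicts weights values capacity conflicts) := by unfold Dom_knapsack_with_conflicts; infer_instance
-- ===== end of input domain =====

-- B replaces A's per-mask recomputation (collect items, then pairwise conflict checks) by a
-- branch recursion over items carrying running weight/value and a conflict bitmask (alternative).

-- ===== PORT A =====
-- conflict_sets = [set() for _ in range(n)]; for i, j in conflicts: conflict_sets[i].add(j); conflict_sets[j].add(i)
-- (list indices are nonnegative and in range under Pre_, so .toNat/List.set is exact there)
def pvBuildSets (n : Nat) (conflicts : List (Int × Int)) : List (PySem.Set Int) :=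
  conflicts.foldl (fun s p =>
    let s1 := s.set p.1.toNat (PySem.Set.add (s.getD p.1.toNat []) p.2)
    s1.set p.2.toNat (PySem.Set.add (s1.getD p.2.toNat []) p.1))
    (List.replicate n PySem.Set.empty)

-- the inner 'for i in range(n)' loop building (selected_items, total_weight, total_value)
-- (range over nonnegative ints ported as List.range; indices < n = len(weights) ≤ len(values) under Pre_)
def pvCollect (weights values : List Int) (n : Nat) (mask : Nat) : List Nat × Int × Int :=
  (List.range n).foldl (fun st i =>
    if mask &&& (1 <<< i) ≠ 0 then
      (st.1 ++ [i], st.2.1 + weights.getD i 0, st.2.2 + values.getD i 0)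
    else st)
    ([], 0, 0)

-- the double 'for i in selected: for j in selected:' conflict check (break = the all/all value)
def pvValid (sets : List (PySem.Set Int)) (selected : List Nat) : Bool :=
  selected.all (fun i => selected.all (fun j =>
    !(decide (i ≠ j) && PySem.Set.contains (sets.getD i []) (j : Int))))

def knapsack_with_conflicts (weights : List Int) (values : List Int) (capacity : Int) (conflicts : List (Int × Int)) : Int :=
  let n := weights.length
  if n > 20 then -1
  else
    let sets := pvBuildSets n conflicts
    (List.range (2 ^ n)).foldl (fun max_value mask =>
      let st := pvCollect weights values n mask
      if st.2.1 > capacity then max_value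
      else if pvValid sets st.1 then max max_value st.2.2
      else max_value) 0

-- ===== PORT B =====
-- conf = [0]*n; for i, j in conflicts: conf[i] |= 1 << j; conf[j] |= 1 << i
def pvBuildConf (n : Nat) (conflicts : List (Int × Int)) : List Nat :=
  conflicts.foldl (fun c p =>
    let c1 := c.set p.1.toNat (c.getD p.1.toNat 0 ||| (1 <<< p.2.toNat))
    c1.set p.2.toNat (c1.getD p.2.toNat 0 ||| (1 <<< p.1.toNat)))
    (List.replicate n 0)

-- def go(i, w, v, banned): ...
def pvGo (weights values : List Int) (capacity : Int) (conf : List Nat) (n i : Nat) (w v : Int) (banned : Nat) : Int :=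
  if _h : i < n then
    let best := pvGo weights values capacity conf n (i + 1) w v banned
    if (banned >>> i) &&& 1 == 0 then
      max best (pvGo weights values capacity conf n (i + 1)
        (w + weights.getD i 0) (v + values.getD i 0) (banned ||| conf.getD i 0))
    else best
  else if w ≤ capacity then v else 0
termination_by n - i

def knapsack_with_conflicts_alt (weights : List Int) (values : List Int) (capacity : Int) (conflicts : List (Int × Int)) : Int :=
  let n := weights.length
  if n > 20 then -1
  else pvGo weights values capacity (pvBuildConf n conflicts) n 0 0 0 0

-- ===== PRECONDITION & SPEC =====
-- Pre_ excludes (when n ≤ 20) inputs where the Python programs raise: conflict pairs with an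
-- index outside [-n, n) and values shorter than weights raise IndexError in A; a conflict index
-- in [-n, -1] only "works" in A through Python's accidental negative-list-index wraparound while
-- B's bit-shift raises ValueError there, so those inputs are excluded too.
def Pre_knapsack_with_conflicts (weights : List Int) (values : List Int) (capacity : Int) (conflicts : List (Int × Int)) : Prop :=
  20 < weights.length ∨
    ((∀ p ∈ conflicts, 0 ≤ p.1 ∧ p.1 < (weights.length : Int) ∧ 0 ≤ p.2 ∧ p.2 < (weights.length : Int)) ∧
      weights.length ≤ values.length)
instance (weights : List Int) (values : List Int) (capacity : Int) (conflicts : List (Int × Int)) : Decidable (Pre_knapsack_with_conflicts weights values capacity conflicts) := by unfold Pre_knapsack_with_conflicts; infer_instance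

def pvWitness_knapsack_with_conflicts : List Int × List Int × Int × (List (Int × Int)) :=
  ([2, 3], [3, 4], 5, [(0, 1)])

def Spec_knapsack_with_conflicts (weights : List Int) (values : List Int) (capacity : Int) (conflicts : List (Int × Int)) (out : Int) : Prop := out = knapsack_with_conflicts_alt weights values capacity conflicts
instance (weights : List Int) (values : List Int) (capacity : Int) (conflicts : List (Int × Int)) (out : Int) : Decidable (Spec_knapsack_with_conflicts weights values capacity conflicts out) := by unfold Spec_knapsack_with_conflicts; infer_instance

-- ===== CLAIM (what is proved, stated in full; the proofs are below) =====
def Claim_equal_knapsack_with_conflicts : Prop := ∀ (weights : List Int) (values : List Int) (capacity : Int) (conflicts : List (Int × Int)), Dom_knapsack_with_conflicts weights values capacity conflicts → Pre_knapsack_with_conflicts weights values capacity conflicts → Spec_knapsack_with_conflicts weights values capacity conflicts (knapsack_with_conflicts weights values capacity conflicts)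

-- ===== LEMMAS AND PROOFS =====

-- spec-side values of a mask: selected indices, total weight/value over range n
def pvSel (n m : Nat) : List Nat :=
  (List.range n).filter (fun i => decide (m &&& (1 <<< i) ≠ 0))

def pvSum (xs : List Int) (n m : Nat) : Int :=
  ((List.range n).map (fun j => if m.testBit j then xs.getD j 0 else 0)).sum

def pvLeaf (capacity w v : Int) : Int := if w ≤ capacity then v else 0

def pvFree (conf : List Nat) (m : Nat) : Prop :=
  ∀ j k : Nat, j < k → m.testBit j = true → m.testBit k = true → (conf.getD j 0).testBit k = false

def pvGood (conf : List Nat) (n i banned m : Nat) : Prop :=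
  (∀ j, m.testBit j = true → i ≤ j ∧ j < n) ∧ pvFree conf m ∧
    (∀ j, m.testBit j = true → banned.testBit j = false)

lemma pv_bit_iff (m i : Nat) : m &&& (1 <<< i) ≠ 0 ↔ m.testBit i = true := by
  rw [Nat.shiftLeft_eq, one_mul]
  simp [Nat.and_two_pow]

lemma pv_shift_iff (banned i : Nat) : ((banned >>> i) &&& 1 == 0) = true ↔ banned.testBit i = false := by
  simp [Nat.testBit]

lemma pv_mask_zero (m : Nat) (h : ∀ j, m.testBit j = true → False) : m = 0 :=
  Nat.zero_of_testBit_eq_false (fun j => by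
    cases hj : m.testBit j
    · rfl
    · exact absurd (h j hj) not_false)

lemma pvSum_zero (xs : List Int) (n : Nat) : pvSum xs n 0 = 0 := by
  simp [pvSum]

lemma pvSum_eq_finset (xs : List Int) (n m : Nat) :
    pvSum xs n m = ∑ j ∈ Finset.range n, (if m.testBit j then xs.getD j 0 else 0) := rfl

lemma pv_testBit_or_pow (m i j : Nat) :
    (m ||| (1 <<< i)).testBit j = (m.testBit j || decide (i = j)) := by
  rw [Nat.shiftLeft_eq, one_mul, Nat.testBit_or, Nat.testBit_two_pow]

lemma pvSum_or (xs : List Int) (n m i : Nat) (hi : i < n) (hm : m.testBit i = false) :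
    pvSum xs n (m ||| (1 <<< i)) = xs.getD i 0 + pvSum xs n m := by
  rw [pvSum_eq_finset, pvSum_eq_finset]
  have hpt : ∀ j, (if (m ||| (1 <<< i)).testBit j then xs.getD j 0 else 0)
      = (if m.testBit j then xs.getD j 0 else 0) + (if j = i then xs.getD i 0 else 0) := by
    intro j
    rw [pv_testBit_or_pow]
    by_cases hji : j = i
    · subst hji; simp [hm]
    · have hij : ¬ i = j := fun h => hji h.symm
      simp [hji, hij]
  rw [Finset.sum_congr rfl (fun j _ => hpt j), Finset.sum_add_distrib,
    Finset.sum_ite_eq' (Finset.range n) i (fun _ => xs.getD i 0)]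
  simp [Finset.mem_range.mpr hi, add_comm]

lemma pv_mem_sel (n m i : Nat) : i ∈ pvSel n m ↔ i < n ∧ m.testBit i = true := by
  simp [pvSel, List.mem_filter, pv_bit_iff]

-- the inner 'for i in range(n)' loop computes (pvSel, pvSum weights, pvSum values)
lemma pv_collect_eq (weights values : List Int) (m : Nat) : ∀ n,
    pvCollect weights values n m = (pvSel n m, pvSum weights n m, pvSum values n m) := by
  intro n
  induction n with
  | zero => simp [pvCollect, pvSel, pvSum]
  | succ k ih =>
    have hfold : pvCollect weights values (k+1) m =
        (fun st i => if m &&& (1 <<< i) ≠ 0 then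
            (st.1 ++ [i], st.2.1 + weights.getD i 0, st.2.2 + values.getD i 0)
          else st) (pvCollect weights values k m) k := by
      simp [pvCollect, List.range_succ]
    rw [hfold, ih]
    by_cases hb : m.testBit k
    · simp only [pv_bit_iff, hb]
      simp only [if_pos trivial]
      have h1 : pvSel (k+1) m = pvSel k m ++ [k] := by
        simp [pvSel, List.range_succ, List.filter_append, pv_bit_iff, hb]
      have h2 : ∀ xs : List Int, pvSum xs (k+1) m = pvSum xs k m + xs.getD k 0 := by
        intro xs; simp [pvSum, List.range_succ, hb]
      simp [h1, h2]
    · have h1 : pvSel (k+1) m = pvSel k m := by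
        simp [pvSel, List.range_succ, List.filter_append, pv_bit_iff, hb]
      have h2 : ∀ xs : List Int, pvSum xs (k+1) m = pvSum xs k m := by
        intro xs; simp [pvSum, List.range_succ, hb]
      have hcond : ¬ (m &&& (1 <<< k) ≠ 0) := by
        simp [pv_bit_iff, hb]
      simp [hcond, h1, h2]

-- B's recursion: every leaf value is a lower bound, and some leaf attains the value
lemma pv_good_weaken (conf : List Nat) (n i banned m : Nat) (h : pvGood conf n (i+1) banned m) :
    pvGood conf n i banned m :=
  ⟨fun j hj => ⟨Nat.le_of_succ_le (h.1 j hj).1, (h.1 j hj).2⟩, h.2.1, h.2.2⟩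

lemma pv_eq_or_self (m i : Nat) (hb : m.testBit i = true) : (m ^^^ (1 <<< i)) ||| (1 <<< i) = m := by
  apply Nat.eq_of_testBit_eq
  intro j
  rw [pv_testBit_or_pow, Nat.testBit_xor, Nat.shiftLeft_eq, one_mul, Nat.testBit_two_pow]
  by_cases hj : i = j
  · subst hj; simp [hb]
  · simp [hj]

lemma pv_testBit_xor_pow (m i j : Nat) :
    (m ^^^ (1 <<< i)).testBit j = (m.testBit j).xor (decide (i = j)) := by
  rw [Nat.testBit_xor, Nat.shiftLeft_eq, one_mul, Nat.testBit_two_pow]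

lemma pv_go_ge (weights values : List Int) (capacity : Int) (conf : List Nat) (n : Nat) :
    ∀ (d i : Nat), n - i = d → ∀ (w v : Int) (banned m : Nat), pvGood conf n i banned m →
      pvLeaf capacity (w + pvSum weights n m) (v + pvSum values n m) ≤
        pvGo weights values capacity conf n i w v banned := by
  intro d
  induction d with
  | zero =>
    intro i hd w v banned m hg
    have hin : ¬ i < n := by omega
    have hm0 : m = 0 := pv_mask_zero m (fun j hj => by have := hg.1 j hj; omega)
    rw [pvGo, dif_neg hin]
    subst hm0
    simp [pvSum_zero, pvLeaf]
  | succ k ih =>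
    intro i hd w v banned m hg
    have hin : i < n := by omega
    have hd' : n - (i+1) = k := by omega
    rw [pvGo, dif_pos hin]
    dsimp only
    by_cases hb : m.testBit i
    · -- item i is selected: go through the candidate branch
      have hbanned : banned.testBit i = false := hg.2.2 i hb
      rw [if_pos ((pv_shift_iff banned i).mpr hbanned)]
      set m' := m ^^^ (1 <<< i) with hm'
      have hbit' : ∀ j, m'.testBit j = (m.testBit j && !decide (i = j)) := by
        intro j
        rw [hm', pv_testBit_xor_pow]
        by_cases hj : i = j
        · subst hj; simp [hb]
        · simp [hj]
      have hbi' : m'.testBit i = false := by simp [hbit']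
      have hg' : pvGood conf n (i+1) (banned ||| conf.getD i 0) m' := by
        refine ⟨?_, ?_, ?_⟩
        · intro j hj
          rw [hbit'] at hj
          simp only [Bool.and_eq_true, Bool.not_eq_true', decide_eq_false_iff_not] at hj
          have := hg.1 j hj.1
          omega
        · intro j k' hjk hj hk
          rw [hbit'] at hj hk
          simp only [Bool.and_eq_true] at hj hk
          exact hg.2.1 j k' hjk hj.1 hk.1
        · intro j hj
          rw [hbit'] at hj
          simp only [Bool.and_eq_true, Bool.not_eq_true', decide_eq_false_iff_not] at hj
          rw [Nat.testBit_or, hg.2.2 j hj.1, Bool.false_or]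
          have hij : i < j := by
            have := hg.1 j hj.1
            omega
          exact hg.2.1 i j hij hb hj.1
      have hsum : ∀ xs : List Int, pvSum xs n m = xs.getD i 0 + pvSum xs n m' := by
        intro xs
        conv_lhs => rw [← pv_eq_or_self m i hb]
        rw [← hm', pvSum_or xs n m' i hin hbi']
      have := ih (i+1) hd' (w + weights.getD i 0) (v + values.getD i 0)
        (banned ||| conf.getD i 0) m' hg'
      refine le_trans ?_ (le_max_of_le_right this)
      rw [hsum weights, hsum values]
      apply le_of_eq
      congr 1 <;> ring
    · -- item i not selected
      have hg' : pvGood conf n (i+1) banned m := by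
        refine ⟨?_, hg.2.1, hg.2.2⟩
        intro j hj
        have h1 := hg.1 j hj
        have hji : j ≠ i := fun h => by rw [h] at hj; rw [hj] at hb; exact hb rfl
        omega
      have hle := ih (i+1) hd' w v banned m hg'
      by_cases hc : ((banned >>> i) &&& 1 == 0) = true
      · rw [if_pos hc]; exact le_trans hle (le_max_left _ _)
      · rw [if_neg hc]; exact hle

lemma pv_go_attain (weights values : List Int) (capacity : Int) (conf : List Nat) (n : Nat) :
    ∀ (d i : Nat), n - i = d → ∀ (w v : Int) (banned : Nat),
      ∃ m, pvGood conf n i banned m ∧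
        pvGo weights values capacity conf n i w v banned =
          pvLeaf capacity (w + pvSum weights n m) (v + pvSum values n m) := by
  intro d
  induction d with
  | zero =>
    intro i hd w v banned
    have hin : ¬ i < n := by omega
    refine ⟨0, ⟨fun j hj => by simp at hj, fun j k _ hj _ => by simp at hj,
      fun j hj => by simp at hj⟩, ?_⟩
    rw [pvGo, dif_neg hin]
    simp [pvSum_zero, pvLeaf]
  | succ k ih =>
    intro i hd w v banned
    have hin : i < n := by omega
    have hd' : n - (i+1) = k := by omega
    rw [pvGo, dif_pos hin]
    dsimp only
    obtain ⟨m1, hg1, he1⟩ := ih (i+1) hd' w v banned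
    by_cases hc : ((banned >>> i) &&& 1 == 0) = true
    · rw [if_pos hc]
      obtain ⟨m2, hg2, he2⟩ := ih (i+1) hd' (w + weights.getD i 0) (v + values.getD i 0)
        (banned ||| conf.getD i 0)
      rcases le_total (pvGo weights values capacity conf n (i+1) (w + weights.getD i 0)
          (v + values.getD i 0) (banned ||| conf.getD i 0))
          (pvGo weights values capacity conf n (i+1) w v banned) with hle | hle
      · exact ⟨m1, pv_good_weaken conf n i banned m1 hg1, by rw [max_eq_left hle, he1]⟩
      · -- the candidate wins: the witness is m2 with bit i added
        have hbanned : banned.testBit i = false := (pv_shift_iff banned i).mp hc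
        have hbi2 : m2.testBit i = false := by
          cases hb2 : m2.testBit i
          · rfl
          · have := (hg2.1 i hb2).1; omega
        set M := m2 ||| (1 <<< i) with hM
        have hbitM : ∀ j, M.testBit j = (m2.testBit j || decide (i = j)) := by
          intro j; rw [hM, pv_testBit_or_pow]
        have hgM : pvGood conf n i banned M := by
          refine ⟨?_, ?_, ?_⟩
          · intro j hj
            rw [hbitM] at hj
            rcases Bool.or_eq_true_iff.mp hj with hj | hj
            · have := hg2.1 j hj; omega
            · have : i = j := of_decide_eq_true hj; omega
          · intro j k' hjk hj hk
            rw [hbitM] at hj hk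
            rcases Bool.or_eq_true_iff.mp hj with hj | hj <;>
              rcases Bool.or_eq_true_iff.mp hk with hk | hk
            · exact hg2.2.1 j k' hjk hj hk
            · -- k' = i yet k' > j ≥ i+1: impossible
              have hik : i = k' := of_decide_eq_true hk
              have := (hg2.1 j hj).1
              omega
            · -- j = i, k' a bit of m2: conf i has bit k' false since m2 avoids banned ∪ conf i
              have hij : i = j := of_decide_eq_true hj
              subst hij
              have := hg2.2.2 k' hk
              rw [Nat.testBit_or, Bool.or_eq_false_iff] at this
              exact this.2
            · have h1 : i = j := of_decide_eq_true hj
              have h2 : i = k' := of_decide_eq_true hk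
              omega
          · intro j hj
            rw [hbitM] at hj
            rcases Bool.or_eq_true_iff.mp hj with hj | hj
            · have := hg2.2.2 j hj
              rw [Nat.testBit_or, Bool.or_eq_false_iff] at this
              exact this.1
            · have : i = j := of_decide_eq_true hj
              subst this; exact hbanned
        refine ⟨M, hgM, ?_⟩
        rw [max_eq_right hle, he2]
        have hsum : ∀ xs : List Int, pvSum xs n M = xs.getD i 0 + pvSum xs n m2 := by
          intro xs; rw [hM, pvSum_or xs n m2 i hin hbi2]
        rw [hsum weights, hsum values]
        congr 1 <;> ring
    · rw [if_neg hc]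
      exact ⟨m1, pv_good_weaken conf n i banned m1 hg1, he1⟩

-- correspondence between A's conflict_sets and B's conflict bitmasks
def pvCorr (n : Nat) (ss : List (PySem.Set Int)) (cc : List Nat) : Prop :=
  ss.length = n ∧ cc.length = n ∧
    (∀ i j : Nat, i < n → j < n →
      (PySem.Set.contains (ss.getD i []) (j : Int) = true ↔ (cc.getD i 0).testBit j = true)) ∧
    (∀ i j : Nat, i < n → j < n →
      ((cc.getD i 0).testBit j = true ↔ (cc.getD j 0).testBit i = true))

lemma pv_getD_set_eq {α : Type} [Inhabited α] (l : List α) (a : Nat) (x d : α) (ha : a < l.length) :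
    (l.set a x).getD a d = x := by
  rw [List.getD_eq_getElem?_getD, List.getElem?_set_self ha]
  rfl

lemma pv_getD_set_ne {α : Type} [Inhabited α] (l : List α) (a i : Nat) (x d : α) (h : a ≠ i) :
    (l.set a x).getD i d = l.getD i d := by
  rw [List.getD_eq_getElem?_getD, List.getElem?_set_ne h, ← List.getD_eq_getElem?_getD]

lemma pv_contains_set_add (ss : List (PySem.Set Int)) (a : Nat) (b : Int) (ha : a < ss.length)
    (i : Nat) (j : Int) :
    (PySem.Set.contains ((ss.set a (PySem.Set.add (ss.getD a []) b)).getD i []) j = true) ↔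
      (PySem.Set.contains (ss.getD i []) j = true ∨ (i = a ∧ j = b)) := by
  by_cases hia : i = a
  · subst hia
    rw [pv_getD_set_eq ss i _ _ ha, PySem.Set.contains_iff, PySem.Set.mem_add,
      PySem.Set.contains_iff]
    tauto
  · rw [pv_getD_set_ne ss a i _ _ (fun h => hia h.symm)]
    tauto

lemma pv_bit_set_or (cc : List Nat) (a b : Nat) (ha : a < cc.length) (i j : Nat) :
    (((cc.set a (cc.getD a 0 ||| (1 <<< b))).getD i 0).testBit j = true) ↔
      ((cc.getD i 0).testBit j = true ∨ (i = a ∧ j = b)) := by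
  by_cases hia : i = a
  · subst hia
    rw [pv_getD_set_eq cc i _ _ ha, pv_testBit_or_pow]
    simp only [Bool.or_eq_true, decide_eq_true_eq]
    constructor
    · intro h
      rcases h with h | h
      · exact Or.inl h
      · exact Or.inr ⟨by trivial, h.symm⟩
    · intro h
      rcases h with h | ⟨_, h⟩
      · exact Or.inl h
      · exact Or.inr h.symm
  · rw [pv_getD_set_ne cc a i _ _ (fun h => hia h.symm)]
    constructor
    · exact Or.inl
    · intro h
      rcases h with h | ⟨h, _⟩
      · exact h
      · exact absurd h hia

lemma pv_corr_step (n : Nat) (ss : List (PySem.Set Int)) (cc : List Nat) (p : Int × Int)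
    (hp : 0 ≤ p.1 ∧ p.1 < (n : Int) ∧ 0 ≤ p.2 ∧ p.2 < (n : Int)) (hc : pvCorr n ss cc) :
    pvCorr n
      ((fun s (q : Int × Int) =>
        let s1 := s.set q.1.toNat (PySem.Set.add (s.getD q.1.toNat []) q.2)
        s1.set q.2.toNat (PySem.Set.add (s1.getD q.2.toNat []) q.1)) ss p)
      ((fun c (q : Int × Int) =>
        let c1 := c.set q.1.toNat (c.getD q.1.toNat 0 ||| (1 <<< q.2.toNat))
        c1.set q.2.toNat (c1.getD q.2.toNat 0 ||| (1 <<< q.1.toNat))) cc p) := by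
  obtain ⟨hs, hcl, hcorr, hsym⟩ := hc
  set a := p.1.toNat with hA
  set b := p.2.toNat with hB
  have han : a < n := by omega
  have hbn : b < n := by omega
  have hpa : ((a : Int)) = p.1 := by omega
  have hpb : ((b : Int)) = p.2 := by omega
  dsimp only
  rw [← hpa, ← hpb]
  simp only [Int.toNat_natCast]
  have hs1 : (ss.set a (PySem.Set.add (ss.getD a []) (b : Int))).length = n := by
    rw [List.length_set]; exact hs
  have hc1 : (cc.set a (cc.getD a 0 ||| (1 <<< b))).length = n := by
    rw [List.length_set]; exact hcl
  have hchar : ∀ i j : Nat, i < n → j < n →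
      (PySem.Set.contains
        (((ss.set a (PySem.Set.add (ss.getD a []) (b:Int))).set b
          (PySem.Set.add ((ss.set a (PySem.Set.add (ss.getD a []) (b:Int))).getD b []) (a:Int))).getD i [])
        (j : Int) = true ↔
        (PySem.Set.contains (ss.getD i []) (j:Int) = true ∨ (i = a ∧ j = b) ∨ (i = b ∧ j = a))) := by
    intro i j hi hj
    rw [pv_contains_set_add _ b (a:Int) (by omega) i (j:Int),
      pv_contains_set_add ss a (b:Int) (by omega) i (j:Int)]
    have hcast : ∀ x y : Nat, ((x:Int) = (y:Int)) ↔ x = y := fun x y => Int.natCast_inj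
    constructor
    · rintro ((h | ⟨h1,h2⟩) | ⟨h1,h2⟩)
      · exact Or.inl h
      · exact Or.inr (Or.inl ⟨h1, (hcast j b).mp h2⟩)
      · exact Or.inr (Or.inr ⟨h1, (hcast j a).mp h2⟩)
    · rintro (h | ⟨h1,h2⟩ | ⟨h1,h2⟩)
      · exact Or.inl (Or.inl h)
      · exact Or.inl (Or.inr ⟨h1, by rw [h2]⟩)
      · exact Or.inr ⟨h1, by rw [h2]⟩
  have hcharc : ∀ i j : Nat, i < n →
      ((((cc.set a (cc.getD a 0 ||| (1 <<< b))).set b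
          ((cc.set a (cc.getD a 0 ||| (1 <<< b))).getD b 0 ||| (1 <<< a))).getD i 0).testBit j = true ↔
        ((cc.getD i 0).testBit j = true ∨ (i = a ∧ j = b) ∨ (i = b ∧ j = a))) := by
    intro i j hi
    rw [pv_bit_set_or _ b a (by omega) i j, pv_bit_set_or cc a b (by omega) i j]
    tauto
  refine ⟨by rw [List.length_set]; exact hs1, by rw [List.length_set]; exact hc1, ?_, ?_⟩
  · intro i j hi hj
    rw [hchar i j hi hj, hcharc i j hi, hcorr i j hi hj]
  · intro i j hi hj
    rw [hcharc i j hi, hcharc j i hj, hsym i j hi hj]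
    tauto

lemma pv_build_corr (n : Nat) : ∀ (l : List (Int × Int)) (ss : List (PySem.Set Int)) (cc : List Nat),
    (∀ p ∈ l, 0 ≤ p.1 ∧ p.1 < (n : Int) ∧ 0 ≤ p.2 ∧ p.2 < (n : Int)) → pvCorr n ss cc →
    pvCorr n
      (l.foldl (fun s p =>
        let s1 := s.set p.1.toNat (PySem.Set.add (s.getD p.1.toNat []) p.2)
        s1.set p.2.toNat (PySem.Set.add (s1.getD p.2.toNat []) p.1)) ss)
      (l.foldl (fun c p =>
        let c1 := c.set p.1.toNat (c.getD p.1.toNat 0 ||| (1 <<< p.2.toNat))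
        c1.set p.2.toNat (c1.getD p.2.toNat 0 ||| (1 <<< p.1.toNat))) cc) := by
  intro l
  induction l with
  | nil => intro ss cc _ hc; exact hc
  | cons p t ih =>
    intro ss cc hb hc
    simp only [List.foldl_cons]
    exact ih _ _ (fun q hq => hb q (List.mem_cons_of_mem p hq))
      (pv_corr_step n ss cc p (hb p List.mem_cons_self) hc)

lemma pv_corr_init (n : Nat) : pvCorr n (List.replicate n PySem.Set.empty) (List.replicate n 0) := by
  refine ⟨List.length_replicate, List.length_replicate, ?_, ?_⟩
  · intro i j hi hj
    have h1 : (List.replicate n (PySem.Set.empty : PySem.Set Int)).getD i [] = ([] : List Int) := by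
      simp [List.getD, hi, PySem.Set.empty]
    have h2 : (List.replicate n (0:Nat)).getD i 0 = 0 := by
      simp [List.getD, hi]
    rw [h1, h2, PySem.Set.contains_iff]
    simp
  · intro i j hi hj
    have h2 : ∀ k, k < n → (List.replicate n (0:Nat)).getD k 0 = 0 := by
      intro k hk; simp [List.getD, hk]
    rw [h2 i hi, h2 j hj]
    simp

lemma pv_build_spec (n : Nat) (conflicts : List (Int × Int))
    (hb : ∀ p ∈ conflicts, 0 ≤ p.1 ∧ p.1 < (n : Int) ∧ 0 ≤ p.2 ∧ p.2 < (n : Int)) :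
    pvCorr n (pvBuildSets n conflicts) (pvBuildConf n conflicts) := by
  unfold pvBuildSets pvBuildConf
  exact pv_build_corr n conflicts _ _ hb (pv_corr_init n)

-- A's pairwise conflict check agrees with pvFree through the correspondence
lemma pv_valid_iff (n : Nat) (sets : List (PySem.Set Int)) (conf : List Nat)
    (hc : pvCorr n sets conf) (m : Nat) (hm : ∀ j, m.testBit j = true → j < n) :
    (pvValid sets (pvSel n m) = true) ↔ pvFree conf m := by
  obtain ⟨-, -, hco, hsym⟩ := hc
  have hval : (pvValid sets (pvSel n m) = true) ↔
      ∀ i ∈ pvSel n m, ∀ j ∈ pvSel n m,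
        ¬(i ≠ j ∧ PySem.Set.contains (sets.getD i []) ((j : Nat) : Int) = true) := by
    unfold pvValid
    rw [List.all_eq_true]
    apply forall₂_congr
    intro i _
    rw [List.all_eq_true]
    apply forall₂_congr
    intro j _
    by_cases h1 : i = j
    · subst h1; simp
    · by_cases h2 : PySem.Set.contains (sets.getD i []) ((j : Nat) : Int) = true
      · simp [h1, h2]
      · simp only [Bool.not_eq_true'] at h2
        simp [h1, h2]
  rw [hval]
  constructor
  · intro h j k hjk hbj hbk
    have hjn := hm j hbj
    have hkn := hm k hbk
    have hj' : j ∈ pvSel n m := (pv_mem_sel n m j).mpr ⟨hjn, hbj⟩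
    have hk' : k ∈ pvSel n m := (pv_mem_sel n m k).mpr ⟨hkn, hbk⟩
    have hne : j ≠ k := Nat.ne_of_lt hjk
    by_contra hbit
    exact h j hj' k hk' ⟨hne, (hco j k hjn hkn).mpr (Bool.not_eq_false _ |>.mp hbit)⟩
  · intro hf i hi j hj
    rintro ⟨hne, hcont⟩
    have hin := ((pv_mem_sel n m i).mp hi).1
    have hbi := ((pv_mem_sel n m i).mp hi).2
    have hjn := ((pv_mem_sel n m j).mp hj).1
    have hbj := ((pv_mem_sel n m j).mp hj).2
    have hbit : (conf.getD i 0).testBit j = true := (hco i j hin hjn).mp hcont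
    rcases Nat.lt_or_ge i j with hlt | hge
    · rw [hf i j hlt hbi hbj] at hbit
      exact Bool.false_ne_true hbit
    · have hlt2 : j < i := by omega
      have hbit2 : (conf.getD j 0).testBit i = true := (hsym i j hin hjn).mp hbit
      rw [hf j i hlt2 hbj hbi] at hbit2
      exact Bool.false_ne_true hbit2

-- generic facts about A's max-accumulating fold
lemma pv_fold_ge_acc (step : Int → Nat → Int) (C : Nat → Bool) (V : Nat → Int)
    (hstep : ∀ a m, step a m = if C m then max a (V m) else a) :
    ∀ (L : List Nat) (acc : Int), acc ≤ L.foldl step acc := by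
  intro L
  induction L with
  | nil => intro acc; simp
  | cons x t ih =>
    intro acc
    rw [List.foldl_cons, hstep]
    by_cases h : C x = true
    · rw [if_pos h]
      exact le_trans (le_max_left _ _) (ih _)
    · rw [if_neg h]
      exact ih acc

lemma pv_fold_ge_elem (step : Int → Nat → Int) (C : Nat → Bool) (V : Nat → Int)
    (hstep : ∀ a m, step a m = if C m then max a (V m) else a) :
    ∀ (L : List Nat) (acc : Int) (m : Nat), m ∈ L → C m = true → V m ≤ L.foldl step acc := by
  intro L
  induction L with
  | nil => intro acc m h; simp at h
  | cons x t ih =>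
    intro acc m hm hc
    rcases List.mem_cons.mp hm with rfl | hm
    · rw [List.foldl_cons, hstep, if_pos hc]
      exact le_trans (le_max_right _ _) (pv_fold_ge_acc step C V hstep t _)
    · rw [List.foldl_cons]
      exact ih _ m hm hc

lemma pv_fold_attain (step : Int → Nat → Int) (C : Nat → Bool) (V : Nat → Int)
    (hstep : ∀ a m, step a m = if C m then max a (V m) else a) :
    ∀ (L : List Nat) (acc : Int),
      L.foldl step acc = acc ∨ ∃ m ∈ L, C m = true ∧ L.foldl step acc = V m := by
  intro L
  induction L with
  | nil => intro acc; left; rfl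
  | cons x t ih =>
    intro acc
    rw [List.foldl_cons, hstep]
    by_cases hcx : C x = true
    · rw [if_pos hcx]
      rcases ih (max acc (V x)) with h | ⟨m, hm, hc, he⟩
      · rw [h]
        rcases max_choice acc (V x) with h2 | h2
        · left; exact h2
        · right; exact ⟨x, List.mem_cons_self, hcx, h2⟩
      · right; exact ⟨m, List.mem_cons_of_mem x hm, hc, he⟩
    · rw [if_neg hcx]
      rcases ih acc with h | ⟨m, hm, hc, he⟩
      · left; exact h
      · right; exact ⟨m, List.mem_cons_of_mem x hm, hc, he⟩

lemma pv_leaf_zero (capacity : Int) : pvLeaf capacity 0 0 = 0 := by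
  unfold pvLeaf; split <;> rfl

-- ===== VERDICT (by name: the statement is the Claim_ definition above) =====
theorem knapsack_with_conflicts_spec : Claim_equal_knapsack_with_conflicts := by
  intro weights values capacity conflicts _hDom hPre
  unfold Spec_knapsack_with_conflicts knapsack_with_conflicts knapsack_with_conflicts_alt
  by_cases h20 : weights.length > 20
  · simp [h20]
  · simp only [if_neg h20]
    set n := weights.length with hn
    have hPre' : (∀ p ∈ conflicts, 0 ≤ p.1 ∧ p.1 < (n : Int) ∧ 0 ≤ p.2 ∧ p.2 < (n : Int)) ∧
        n ≤ values.length := by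
      rcases hPre with h | h
      · exact absurd h h20
      · exact h
    obtain ⟨hcf, _hvl⟩ := hPre'
    have hcorr := pv_build_spec n conflicts hcf
    set sets := pvBuildSets n conflicts with hsets
    set conf := pvBuildConf n conflicts with hconf
    set C : Nat → Bool :=
      fun m => (decide (pvSum weights n m ≤ capacity)) && pvValid sets (pvSel n m) with hC
    set V : Nat → Int := fun m => pvSum values n m with hV
    have hstep : ∀ (a : Int) (m : Nat),
        (fun (max_value : Int) (mask : Nat) =>
          let st := pvCollect weights values n mask
          if st.2.1 > capacity then max_value
          else if pvValid sets st.1 then max max_value st.2.2 else max_value) a m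
          = if C m then max a (V m) else a := by
      intro a m
      simp only [pv_collect_eq]
      by_cases h1 : pvSum weights n m > capacity
      · have hc : C m = false := by
          rw [hC]
          simp [not_le.mpr h1]
        simp [h1, hc]
      · by_cases h2 : pvValid sets (pvSel n m) = true
        · have hc : C m = true := by
            rw [hC]
            simp [not_lt.mp h1, h2]
          simp [h1, h2, hc, hV]
        · have hc : C m = false := by
            rw [hC]
            simp [h2]
          simp [h1, h2, hc]
    have hfun : (fun (max_value : Int) (mask : Nat) =>
        let st := pvCollect weights values n mask
        if st.2.1 > capacity then max_value
        else if pvValid sets st.1 then max max_value st.2.2 else max_value)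
        = fun a m => if C m then max a (V m) else a :=
      funext fun a => funext fun m => hstep a m
    have hstep' : ∀ (a : Int) (m : Nat),
        (fun a m => if C m then max a (V m) else a) a m = if C m then max a (V m) else a :=
      fun a m => rfl
    rw [hfun]
    apply le_antisymm
    · -- A's maximum is attained (or 0) and B dominates every attainable value
      rcases pv_fold_attain _ C V hstep' (List.range (2 ^ n)) 0 with h | ⟨m, hmL, hCm, he⟩
      · rw [h]
        have hgood : pvGood conf n 0 0 0 := by
          refine ⟨fun j hj => ?_, fun j k _ hj _ => ?_, fun j hj => ?_⟩ <;> simp at hj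
        have := pv_go_ge weights values capacity conf n n 0 rfl 0 0 0 0 hgood
        rwa [pvSum_zero, pvSum_zero, add_zero, pv_leaf_zero] at this
      · rw [he]
        rw [hC] at hCm
        simp only [Bool.and_eq_true, decide_eq_true_eq] at hCm
        obtain ⟨hw, hvalid⟩ := hCm
        have hmlt : m < 2 ^ n := List.mem_range.mp hmL
        have hbits : ∀ j, m.testBit j = true → j < n := by
          intro j hj
          by_contra hc
          have h2 : m < 2 ^ j :=
            lt_of_lt_of_le hmlt (Nat.pow_le_pow_right (by norm_num) (Nat.le_of_not_lt hc))
          rw [Nat.testBit_eq_false_of_lt h2] at hj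
          exact Bool.false_ne_true hj
        have hfree : pvFree conf m := (pv_valid_iff n sets conf hcorr m hbits).mp hvalid
        have hgood : pvGood conf n 0 0 m :=
          ⟨fun j hj => ⟨Nat.zero_le _, hbits j hj⟩, hfree, fun j _ => Nat.zero_testBit j⟩
        have := pv_go_ge weights values capacity conf n n 0 rfl 0 0 0 m hgood
        rw [zero_add, zero_add] at this
        unfold pvLeaf at this
        rw [if_pos hw] at this
        exact this
    · -- B's value is some leaf value, which A's fold dominates
      obtain ⟨m, hgood, he⟩ := pv_go_attain weights values capacity conf n n 0 rfl 0 0 0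
      rw [he, zero_add, zero_add]
      by_cases hw : pvSum weights n m ≤ capacity
      · unfold pvLeaf
        rw [if_pos hw]
        have hbits : ∀ j, m.testBit j = true → j < n := fun j hj => (hgood.1 j hj).2
        have hmem : m ∈ List.range (2 ^ n) := by
          rw [List.mem_range]
          apply Nat.lt_pow_two_of_testBit
          intro j hj
          cases hb : m.testBit j
          · rfl
          · exact absurd (hbits j hb) (by omega)
        have hCm : C m = true := by
          rw [hC]
          simp [hw, (pv_valid_iff n sets conf hcorr m hbits).mpr hgood.2.1]
        exact pv_fold_ge_elem _ C V hstep' (List.range (2 ^ n)) 0 m hmem hCm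
      · unfold pvLeaf
        rw [if_neg hw]
        exact pv_fold_ge_acc _ C V hstep' (List.range (2 ^ n)) 0
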